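-- pv_equiv track=rewrite | github.com/ruirui688/SLAM | tools/anchor_clip_memory.py | _count_label_flips
-- ===== SOURCE A (Python) =====
-- def _count_label_flips(labels: list[str]) -> int:
--     if len(labels) <= 1:
--         return 0
--     flips = 0
--     previous = labels[0]
--     for current in labels[1:]:
--         if current != previous:
--             flips += 1
--         previous = current
--     return flips
-- ===== SOURCE B (Python) =====
-- def _count_label_flips(labels: list[str]) -> int:
--     def flips(lo: int, hi: int) -> int:
--         # number of adjacent flips within labels[lo:hi]
--         if hi - lo < 2:
--             return 0
--         mid = (lo + hi) // 2
--         boundary = 1 if labels[mid - 1] != labels[mid] else 0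
--         return flips(lo, mid) + flips(mid, hi) + boundary
--     return flips(0, len(labels))
-- ===== Notes on version B (the rewrite author's own statement) =====
-- stated objective: alternative
-- what changed: Divide-and-conquer over index ranges: recursively splits [lo,hi) at the midpoint, sums the flips of the two halves plus one boundary comparison, instead of A's linear previous-variable scan.
import Mathlib
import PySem

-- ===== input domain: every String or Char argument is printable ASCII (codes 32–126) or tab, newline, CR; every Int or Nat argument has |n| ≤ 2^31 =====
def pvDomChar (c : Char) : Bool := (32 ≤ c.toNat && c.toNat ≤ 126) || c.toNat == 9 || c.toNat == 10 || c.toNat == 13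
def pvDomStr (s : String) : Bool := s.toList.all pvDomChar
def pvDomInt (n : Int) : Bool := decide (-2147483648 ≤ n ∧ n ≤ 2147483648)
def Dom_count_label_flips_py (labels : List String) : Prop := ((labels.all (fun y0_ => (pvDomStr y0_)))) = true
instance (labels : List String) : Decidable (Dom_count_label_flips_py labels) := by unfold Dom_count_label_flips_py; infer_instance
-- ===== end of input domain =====

-- B counts flips by divide-and-conquer over index ranges (halves plus one boundary comparison) instead of A's linear previous-variable scan; same O(n) cost, an alternative decomposition.

-- ===== PORT A =====
def count_label_flips_py (labels : List String) : Int :=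
  if labels.length ≤ 1 then 0
  else
    -- labels[0]: the list is nonempty in this branch, so the IndexError default is unreachable
    let previous := (PySem.List.pyGet? labels 0).getD ""
    ((PySem.List.slice labels (some 1) none).foldl
      (fun (st : Int × String) current =>
        (if current ≠ st.2 then st.1 + 1 else st.1, current))
      (0, previous)).1

-- ===== PORT B =====
-- flips(lo, hi): indices are nonnegative throughout, so Nat with Nat division is exact for (lo+hi)//2;
-- labels[mid-1], labels[mid] are always in range in the recursive branch, so getD's default is unreachable.
def pvFlips (labels : List String) (lo hi : Nat) : Int :=
  if _h : hi - lo < 2 then 0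
  else
    -- mid = (lo + hi) // 2, written inline
    pvFlips labels lo ((lo + hi) / 2) + pvFlips labels ((lo + hi) / 2) hi +
      (if labels.getD ((lo + hi) / 2 - 1) "" ≠ labels.getD ((lo + hi) / 2) "" then 1 else 0)
termination_by hi - lo
decreasing_by
  · omega
  · omega

def count_label_flips_py_alt (labels : List String) : Int :=
  pvFlips labels 0 labels.length

-- ===== PRECONDITION & SPEC =====
def Spec_count_label_flips_py (labels : List String) (out : Int) : Prop := out = count_label_flips_py_alt labels
instance (labels : List String) (out : Int) : Decidable (Spec_count_label_flips_py labels out) := by unfold Spec_count_label_flips_py; infer_instance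

-- ===== CLAIM (what is proved, stated in full; the proofs are below) =====
def Claim_equal_count_label_flips_py : Prop := ∀ (labels : List String), Dom_count_label_flips_py labels → Spec_count_label_flips_py labels (count_label_flips_py labels)

-- ===== LEMMAS AND PROOFS =====

-- structural adjacent-flip count: the common specification of both ports
def pvScnt : List String → Int
  | [] => 0
  | [_] => 0
  | x :: y :: t => (if x ≠ y then 1 else 0) + pvScnt (y :: t)

-- the segment labels[lo:hi]
def pvSeg (l : List String) (lo hi : Nat) : List String := (l.drop lo).take (hi - lo)

theorem pvScnt_short (s : List String) (h : s.length ≤ 1) : pvScnt s = 0 := by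
  match s with
  | [] => rfl
  | [_] => rfl
  | _ :: _ :: _ => simp at h

theorem pvScnt_append : ∀ (s t : List String) (a b : String),
    s.getLast? = some a → t.head? = some b →
    pvScnt (s ++ t) = pvScnt s + pvScnt t + (if a ≠ b then 1 else 0) := by
  intro s
  induction s with
  | nil => intro t a b h; simp at h
  | cons c s' ih =>
    intro t a b hla hhd
    match s' with
    | [] =>
      simp at hla
      match t, hhd with
      | b :: t', rfl =>
        subst hla
        simp [pvScnt]
        ring
    | d :: r =>
      have hla' : (d :: r).getLast? = some a := by
        simpa [List.getLast?_cons_cons] using hla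
      have := ih t a b hla' hhd
      simp only [List.cons_append, pvScnt] at *
      rw [this]
      ring

theorem pvSeg_split (l : List String) (lo mid hi : Nat) (h1 : lo ≤ mid) (h2 : mid ≤ hi) :
    pvSeg l lo hi = pvSeg l lo mid ++ pvSeg l mid hi := by
  unfold pvSeg
  have hs : hi - lo = (mid - lo) + (hi - mid) := by omega
  have hd : (l.drop lo).drop (mid - lo) = l.drop mid := by
    rw [List.drop_drop]; congr 1; omega
  rw [hs, List.take_add, hd]

theorem pvSeg_head (l : List String) (mid hi : Nat) (h1 : mid < hi) (h2 : mid < l.length) :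
    (pvSeg l mid hi).head? = some (l.getD mid "") := by
  unfold pvSeg
  rw [List.head?_eq_getElem?, List.getElem?_take]
  simp only [if_pos (by omega : 0 < hi - mid)]
  rw [List.getElem?_drop]
  simp [List.getD, List.getElem?_eq_getElem h2]

theorem pvSeg_last (l : List String) (lo mid : Nat) (h1 : lo < mid) (h2 : mid ≤ l.length) :
    (pvSeg l lo mid).getLast? = some (l.getD (mid - 1) "") := by
  unfold pvSeg
  have hlen : ((l.drop lo).take (mid - lo)).length = mid - lo := by
    simp; omega
  rw [List.getLast?_eq_getElem?, hlen, List.getElem?_take]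
  simp only [if_pos (by omega : mid - lo - 1 < mid - lo)]
  rw [List.getElem?_drop]
  have : lo + (mid - lo - 1) = mid - 1 := by omega
  rw [this]
  simp [List.getD, List.getElem?_eq_getElem (by omega : mid - 1 < l.length)]

theorem pvFlips_eq_scnt (l : List String) :
    ∀ (n lo hi : Nat), hi - lo ≤ n → hi ≤ l.length →
      pvFlips l lo hi = pvScnt (pvSeg l lo hi) := by
  intro n
  induction n with
  | zero =>
    intro lo hi h hlen
    rw [pvFlips, dif_pos (by omega)]
    rw [pvScnt_short _ (by simp [pvSeg]; omega)]
  | succ n ih =>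
    intro lo hi h hlen
    by_cases hsmall : hi - lo < 2
    · rw [pvFlips, dif_pos hsmall]
      rw [pvScnt_short _ (by simp [pvSeg]; omega)]
    · rw [pvFlips, dif_neg hsmall]
      set mid := (lo + hi) / 2 with hmid
      have hm1 : lo < mid := by omega
      have hm2 : mid < hi := by omega
      rw [ih lo mid (by omega) (by omega), ih mid hi (by omega) hlen]
      rw [pvSeg_split l lo mid hi (by omega) (by omega)]
      rw [pvScnt_append (pvSeg l lo mid) (pvSeg l mid hi)
            (l.getD (mid - 1) "") (l.getD mid "")
            (pvSeg_last l lo mid hm1 (by omega))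
            (pvSeg_head l mid hi hm2 (by omega))]

theorem fold_eq_scnt : ∀ (l : List String) (p : String) (c : Int),
    (l.foldl (fun (st : Int × String) current =>
        (if current ≠ st.2 then st.1 + 1 else st.1, current)) (c, p)).1
      = c + pvScnt (p :: l) := by
  intro l
  induction l with
  | nil => intro p c; simp [pvScnt]
  | cons x t ih =>
    intro p c
    simp only [List.foldl_cons]
    by_cases h : x = p
    · rw [if_neg (by simp [h]), ih]
      simp [pvScnt, h]
    · rw [if_pos (by simp [h]), ih]
      have : ¬ p = x := fun hh => h hh.symm
      simp only [pvScnt, if_pos (by simpa using this)]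
      ring

theorem alt_eq_scnt (l : List String) : count_label_flips_py_alt l = pvScnt l := by
  unfold count_label_flips_py_alt
  rw [pvFlips_eq_scnt l l.length 0 l.length (by omega) (by omega)]
  unfold pvSeg
  simp

-- ===== VERDICT (by name: the statement is the Claim_ definition above) =====
theorem count_label_flips_py_spec : Claim_equal_count_label_flips_py := by
  intro labels _
  unfold Spec_count_label_flips_py
  rw [alt_eq_scnt]
  unfold count_label_flips_py
  match labels with
  | [] => decide
  | [a] => simp [pvScnt]
  | a :: b :: t =>
    rw [if_neg (by simp)]
    have h0 : (PySem.List.pyGet? (a :: b :: t) 0).getD "" = a := by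
      have hn : (0:Int) ≤ (t.length:Int) + 1 := by positivity
      simp [PySem.List.pyGet?, PySem.List.pyIdx?, hn]
    simp only [PySem.List.slice_from_one, List.tail_cons, h0]
    rw [fold_eq_scnt (b :: t) a 0, zero_add]
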